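-- pv_equiv track=rewrite | github.com/Diego-SJ/Encryption-by-product | util_methods.py | keyword_num_assign
-- ===== SOURCE A (Python) =====
-- def keyword_num_assign(key):
--     alpha = "12345678"
--     kywrd_num_list = list(range(len(key)))
--     init = 0
--     for i in range(len(alpha)):
--         for j in range(len(key)):
--             if alpha[i] == key[j]:
--                 init += 1
--                 kywrd_num_list[j] = init - 1
--     return kywrd_num_list
-- ===== SOURCE B (Python) =====
-- def keyword_num_assign(key):
--     # counting-sort style: histogram of digit chars, prefix-sum offsets, one assignment pass
--     counts = [0] * 8
--     for c in key:
--         if '1' <= c <= '8':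
--             counts[ord(c) - 49] += 1
--     base = [0] * 8
--     acc = 0
--     for i in range(8):
--         base[i] = acc
--         acc += counts[i]
--     out = []
--     seen = [0] * 8
--     for j, c in enumerate(key):
--         if '1' <= c <= '8':
--             d = ord(c) - 49
--             out.append(base[d] + seen[d])
--             seen[d] += 1
--         else:
--             out.append(j)
--     return out
-- ===== Notes on version B (the rewrite author's own statement) =====
-- stated objective: faster
-- what changed: Replaces the nested scan over the fixed digit alphabet (8 full passes over the key with a global running counter) by a counting-sort scheme: one histogram pass over the key, prefix-sum offsets per digit, and one assignment pass that adds the offset to a per-digit running count.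
import Mathlib
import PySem

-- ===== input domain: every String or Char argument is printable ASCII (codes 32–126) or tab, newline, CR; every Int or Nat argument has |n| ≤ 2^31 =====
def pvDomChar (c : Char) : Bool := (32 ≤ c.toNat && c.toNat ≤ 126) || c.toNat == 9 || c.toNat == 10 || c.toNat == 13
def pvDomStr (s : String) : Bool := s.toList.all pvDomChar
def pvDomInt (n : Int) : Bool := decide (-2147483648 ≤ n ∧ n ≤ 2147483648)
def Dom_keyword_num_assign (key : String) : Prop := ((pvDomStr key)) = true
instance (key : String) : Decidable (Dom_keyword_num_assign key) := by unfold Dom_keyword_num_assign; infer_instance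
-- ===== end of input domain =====

-- B replaces A's 8 alphabet passes by a counting-sort (histogram + prefix offsets + one assignment pass); measured faster by a constant factor.

-- ===== PORT A =====
def keyword_num_assign (key : String) : List Int :=
  let alpha : String := "12345678"
  let res := (PySem.List.pyRange 0 (PySem.Str.len alpha) 1).foldl
    (fun (st : List Int × Int) i =>
      (PySem.List.pyRange 0 (PySem.Str.len key) 1).foldl
        (fun (st2 : List Int × Int) j =>
          if PySem.Str.pyGet? alpha i = PySem.Str.pyGet? key j then
            (PySem.List.pySetD st2.1 j (st2.2 + 1 - 1), st2.2 + 1)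
          else st2) st)
    (PySem.List.pyRange 0 (PySem.Str.len key) 1, (0 : Int))
  res.1

-- ===== PORT B =====
-- (ord(c) - 49 is a Nat index in [0,8) under the '1' ≤ c ≤ '8' guard, so plain List.set/getD are exact)
def keyword_num_assign_alt (key : String) : List Int :=
  let counts : List Int := key.toList.foldl
    (fun cnts c =>
      if '1' ≤ c ∧ c ≤ '8' then cnts.set (c.toNat - 49) (cnts.getD (c.toNat - 49) 0 + 1) else cnts)
    (List.replicate 8 0)
  let bs := (PySem.List.pyRange 0 8 1).foldl
    (fun (st : List Int × Int) i => (PySem.List.pySetD st.1 i st.2, st.2 + PySem.List.pyGetD counts i 0))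
    (List.replicate 8 (0 : Int), (0 : Int))
  let base := bs.1
  let fin := (PySem.List.enumerate key.toList 0).foldl
    (fun (st : List Int × List Int) jc =>
      if '1' ≤ jc.2 ∧ jc.2 ≤ '8' then
        (st.1 ++ [base.getD (jc.2.toNat - 49) 0 + st.2.getD (jc.2.toNat - 49) 0],
         st.2.set (jc.2.toNat - 49) (st.2.getD (jc.2.toNat - 49) 0 + 1))
      else (st.1 ++ [jc.1], st.2))
    (([] : List Int), List.replicate 8 (0 : Int))
  fin.1

-- ===== PRECONDITION & SPEC =====
def Spec_keyword_num_assign (key : String) (out : List Int) : Prop := out = keyword_num_assign_alt key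
instance (key : String) (out : List Int) : Decidable (Spec_keyword_num_assign key out) := by unfold Spec_keyword_num_assign; infer_instance

-- ===== CLAIM (what is proved, stated in full; the proofs are below) =====
def Claim_equal_keyword_num_assign : Prop := ∀ (key : String), Dom_keyword_num_assign key → Spec_keyword_num_assign key (keyword_num_assign key)


-- ===== LEMMAS AND PROOFS =====

-- characterisation used by BOTH sides: after processing digits '1'..'1'+i-1,
-- a digit position j holds (ranks of all smaller digits) + (occurrences of its digit before j)
def pvCnt (cs : List Char) (i : Nat) : Nat := cs.countP (fun c => c.toNat == 49 + i)

def pvLower (cs : List Char) (i : Nat) : Nat := ((List.range i).map (pvCnt cs)).sum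

def pvStage (cs : List Char) (i : Nat) (j : Nat) : Int :=
  if 49 ≤ (cs.getD j ' ').toNat ∧ (cs.getD j ' ').toNat < 49 + i then
    (pvLower cs ((cs.getD j ' ').toNat - 49) : Int) + ((cs.take j).count (cs.getD j ' ') : Int)
  else (j : Int)

-- char facts
lemma pvChar_eq_iff (c d : Char) : c = d ↔ c.toNat = d.toNat :=
  ⟨fun h => by rw [h], fun h => Char.ext (UInt32.toNat_inj.mp h)⟩

lemma pvLe1 (c : Char) : ('1' ≤ c) ↔ 49 ≤ c.toNat := by
  constructor
  · intro h; exact UInt32.le_iff_toNat_le.mp h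
  · intro h; exact UInt32.le_iff_toNat_le.mpr h

lemma pvLe8 (c : Char) : (c ≤ '8') ↔ c.toNat ≤ 56 := by
  constructor
  · intro h; exact UInt32.le_iff_toNat_le.mp h
  · intro h; exact UInt32.le_iff_toNat_le.mpr h

lemma pvCnt_eq_count (cs : List Char) (c : Char) (h : 49 ≤ c.toNat) :
    pvCnt cs (c.toNat - 49) = cs.count c := by
  unfold pvCnt
  rw [List.count_eq_countP]
  apply List.countP_congr
  intro d _
  simp only [beq_iff_eq]
  constructor
  · intro hd; exact (pvChar_eq_iff d c).mpr (by omega)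
  · intro hd; rw [(pvChar_eq_iff d c).mp hd]; omega

lemma pvGetDMapRange (f : Nat → Int) {n j : Nat} (h : j < n) (d : Int) :
    ((List.range n).map f).getD j d = f j := by
  rw [List.getD_eq_getElem _ _ (by simpa using h)]
  simp

lemma pvSetMapRange (f : Nat → Int) (n t : Nat) (v : Int) :
    ((List.range n).map f).set t v = (List.range n).map fun j => if j = t then v else f j := by
  apply List.ext_getElem
  · simp
  · intro i h1 h2
    rw [List.getElem_set]
    simp only [List.getElem_map, List.getElem_range]
    by_cases hit : t = i
    · simp [hit]
    · rw [if_neg hit, if_neg (fun h => hit h.symm)]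

-- ===== A side =====
def pvStepA (key : String) (c : Char) (st2 : List Int × Int) (j : Int) : List Int × Int :=
  if some c = PySem.Str.pyGet? key j then (PySem.List.pySetD st2.1 j (st2.2 + 1 - 1), st2.2 + 1) else st2

def pvInner (key : String) (c : Char) (st : List Int × Int) : List Int × Int :=
  (PySem.List.pyRange 0 (PySem.Str.len key) 1).foldl (pvStepA key c) st

lemma pvInner_aux (key : String) (c : Char) :
    ∀ (t : Nat), t ≤ key.toList.length → ∀ (lst : List Int) (m : Int), lst.length = key.toList.length →
    (PySem.List.pyRange 0 (t : Int) 1).foldl (pvStepA key c) (lst, m) =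
      ((List.range key.toList.length).map
         (fun j => if j < t ∧ key.toList.getD j ' ' = c then m + ((key.toList.take j).count c : Int)
                   else lst.getD j 0),
       m + ((key.toList.take t).count c : Int)) := by
  intro t
  induction t with
  | zero =>
    intro _ lst m hlen
    rw [PySem.List.pyRange_one_eq_nil (by omega)]
    simp only [List.foldl_nil, List.take_zero, List.count_nil, Nat.cast_zero, add_zero,
      Prod.mk.injEq]
    refine ⟨?_, by simp⟩
    apply List.ext_getElem
    · simp [hlen]
    · intro i h1 h2
      simp only [List.getElem_map, List.getElem_range]
      rw [if_neg (by rintro ⟨hx, _⟩; omega)]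
      rw [List.getD_eq_getElem _ _ h1]
  | succ t ih =>
    intro ht lst m hlen
    have hcast : ((t + 1 : Nat) : Int) = (t : Int) + 1 := by push_cast; ring
    rw [hcast, PySem.List.pyRange_one_succ_right (by positivity), List.foldl_append,
      ih (by omega) lst m hlen, List.foldl_cons, List.foldl_nil]
    have htlt : t < key.toList.length := by omega
    have hget : PySem.Str.pyGet? key (t : Int) = some (key.toList.getD t ' ') := by
      rw [PySem.Str.pyGet?_natCast, List.getElem?_eq_getElem htlt,
        List.getD_eq_getElem _ _ htlt]
    have htake : key.toList.take (t + 1) = key.toList.take t ++ [key.toList.getD t ' '] := by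
      rw [List.take_add_one, List.getElem?_eq_getElem htlt, List.getD_eq_getElem _ _ htlt]
      rfl
    unfold pvStepA
    rw [hget]
    by_cases hc : c = key.toList.getD t ' '
    · rw [if_pos (by rw [hc]), PySem.List.pySetD_natCast, pvSetMapRange]
      simp only [Prod.mk.injEq]
      constructor
      · apply List.map_congr_left
        intro j hj
        have hjn : j < key.toList.length := List.mem_range.mp hj
        by_cases hjt : j = t
        · subst hjt
          rw [if_pos rfl, if_pos ⟨by omega, hc.symm⟩]
          ring
        · rw [if_neg hjt]
          have hiff : (j < t + 1 ∧ key.toList.getD j ' ' = c) ↔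
              (j < t ∧ key.toList.getD j ' ' = c) := by
            constructor <;> rintro ⟨hx, hy⟩ <;> exact ⟨by omega, hy⟩
          simp only [hiff]
      · rw [htake, List.count_append, ← hc]
        have h1 : List.count c [c] = 1 := by simp
        rw [h1]
        push_cast
        ring
    · have hne : ¬ (some c = some (key.toList.getD t ' ')) := fun hx => hc (Option.some_inj.mp hx)
      rw [if_neg hne]
      simp only [Prod.mk.injEq]
      constructor
      · apply List.map_congr_left
        intro j hj
        by_cases hjt : j = t
        · subst hjt
          rw [if_neg (by rintro ⟨hx, _⟩; omega),
            if_neg (by rintro ⟨_, hy⟩; exact hc hy.symm)]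
        · have hiff : (j < t + 1 ∧ key.toList.getD j ' ' = c) ↔
              (j < t ∧ key.toList.getD j ' ' = c) := by
            constructor <;> rintro ⟨hx, hy⟩ <;> exact ⟨by omega, hy⟩
          simp only [hiff]
      · rw [htake, List.count_append]
        have : List.count c [key.toList.getD t ' '] = 0 := by
          simp only [List.count_cons, List.count_nil, beq_iff_eq, zero_add]
          rw [if_neg (fun h => hc h.symm)]
        rw [this]
        push_cast
        ring

lemma pvInner_spec (key : String) (c : Char) (lst : List Int) (m : Int)
    (hlen : lst.length = key.toList.length) :
    pvInner key c (lst, m) =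
      ((List.range key.toList.length).map
         (fun j => if key.toList.getD j ' ' = c then m + ((key.toList.take j).count c : Int)
                   else lst.getD j 0),
       m + (key.toList.count c : Int)) := by
  unfold pvInner
  rw [PySem.Str.len_eq, pvInner_aux key c key.toList.length le_rfl lst m hlen,
    List.take_length]
  simp only [Prod.mk.injEq]
  refine ⟨?_, by trivial⟩
  apply List.map_congr_left
  intro j hj
  have hjn : j < key.toList.length := List.mem_range.mp hj
  by_cases hdc : key.toList.getD j ' ' = c
  · rw [if_pos ⟨hjn, hdc⟩, if_pos hdc]
  · rw [if_neg (by rintro ⟨_, h⟩; exact hdc h), if_neg hdc]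

lemma pvStepStage (key : String) (i : Nat) (hi : i < 8) (c : Char) (hc : c.toNat = 49 + i) :
    pvInner key c ((List.range key.toList.length).map (pvStage key.toList i),
        (pvLower key.toList i : Int))
      = ((List.range key.toList.length).map (pvStage key.toList (i + 1)),
        (pvLower key.toList (i + 1) : Int)) := by
  rw [pvInner_spec _ _ _ _ (by simp)]
  simp only [Prod.mk.injEq]
  constructor
  · apply List.map_congr_left
    intro j hj
    have hjn : j < key.toList.length := List.mem_range.mp hj
    rw [pvGetDMapRange (pvStage key.toList i) hjn 0]
    by_cases hd : key.toList.getD j ' ' = c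
    · rw [if_pos hd]
      unfold pvStage
      have htn : (key.toList.getD j ' ').toNat = 49 + i := by rw [hd, hc]
      rw [if_pos (by omega)]
      have h49 : 49 + i - 49 = i := by omega
      rw [htn, h49, hd]
    · rw [if_neg hd]
      unfold pvStage
      have hne : (key.toList.getD j ' ').toNat ≠ 49 + i := by
        intro h
        exact hd ((pvChar_eq_iff _ _).mpr (by omega))
      have hiff : (49 ≤ (key.toList.getD j ' ').toNat ∧ (key.toList.getD j ' ').toNat < 49 + (i + 1)) ↔
          (49 ≤ (key.toList.getD j ' ').toNat ∧ (key.toList.getD j ' ').toNat < 49 + i) := by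
        omega
      simp only [hiff]
  · have hcnt : pvCnt key.toList i = key.toList.count c := by
      have h49 : 49 ≤ c.toNat := by omega
      have := pvCnt_eq_count key.toList c h49
      rw [show c.toNat - 49 = i from by omega] at this
      exact this
    unfold pvLower
    rw [List.range_succ, List.map_append, List.sum_append]
    simp [hcnt]

lemma pvStage_zero (cs : List Char) (j : Nat) : pvStage cs 0 j = (j : Int) := by
  unfold pvStage
  rw [if_neg (by omega)]

lemma pvA_eq (key : String) :
    keyword_num_assign key = (List.range key.toList.length).map (pvStage key.toList 8) := by
  unfold keyword_num_assign
  simp only [show PySem.List.pyRange 0 (PySem.Str.len "12345678") 1 = [0, 1, 2, 3, 4, 5, 6, 7]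
      from by decide,
    List.foldl_cons, List.foldl_nil,
    show PySem.Str.pyGet? "12345678" 0 = some '1' from by decide,
    show PySem.Str.pyGet? "12345678" 1 = some '2' from by decide,
    show PySem.Str.pyGet? "12345678" 2 = some '3' from by decide,
    show PySem.Str.pyGet? "12345678" 3 = some '4' from by decide,
    show PySem.Str.pyGet? "12345678" 4 = some '5' from by decide,
    show PySem.Str.pyGet? "12345678" 5 = some '6' from by decide,
    show PySem.Str.pyGet? "12345678" 6 = some '7' from by decide,
    show PySem.Str.pyGet? "12345678" 7 = some '8' from by decide]
  show (pvInner key '8' (pvInner key '7' (pvInner key '6' (pvInner key '5' (pvInner key '4'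
      (pvInner key '3' (pvInner key '2' (pvInner key '1'
        (PySem.List.pyRange 0 (PySem.Str.len key) 1, 0))))))))).1
    = (List.range key.toList.length).map (pvStage key.toList 8)
  have hstart : (PySem.List.pyRange 0 (PySem.Str.len key) 1, (0 : Int)) =
      ((List.range key.toList.length).map (pvStage key.toList 0), ((pvLower key.toList 0 : Nat) : Int)) := by
    simp only [Prod.mk.injEq]
    constructor
    · rw [PySem.Str.len_eq, PySem.List.pyRange_zero_nat]
      apply List.map_congr_left
      intro j _
      rw [pvStage_zero]
    · simp [pvLower]
  rw [hstart,
    pvStepStage key 0 (by omega) '1' (by decide),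
    pvStepStage key 1 (by omega) '2' (by decide),
    pvStepStage key 2 (by omega) '3' (by decide),
    pvStepStage key 3 (by omega) '4' (by decide),
    pvStepStage key 4 (by omega) '5' (by decide),
    pvStepStage key 5 (by omega) '6' (by decide),
    pvStepStage key 6 (by omega) '7' (by decide),
    pvStepStage key 7 (by omega) '8' (by decide)]

-- ===== B side =====
def pvStepB (base : List Int) (st : List Int × List Int) (jc : Int × Char) : List Int × List Int :=
  if '1' ≤ jc.2 ∧ jc.2 ≤ '8' then
    (st.1 ++ [base.getD (jc.2.toNat - 49) 0 + st.2.getD (jc.2.toNat - 49) 0],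
     st.2.set (jc.2.toNat - 49) (st.2.getD (jc.2.toNat - 49) 0 + 1))
  else (st.1 ++ [jc.1], st.2)

def pvSeen (p : List Char) : List Int := (List.range 8).map fun i => (pvCnt p i : Int)

def pvBVal (base : List Int) (cs : List Char) (j : Nat) : Int :=
  if 49 ≤ (cs.getD j ' ').toNat ∧ (cs.getD j ' ').toNat ≤ 56 then
    base.getD ((cs.getD j ' ').toNat - 49) 0 + ((cs.take j).count (cs.getD j ' ') : Int)
  else (j : Int)

lemma pvSeen_getD (p : List Char) {d : Nat} (hd : d < 8) :
    (pvSeen p).getD d 0 = (pvCnt p d : Int) := by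
  unfold pvSeen
  exact pvGetDMapRange _ hd _

lemma pvCnt_append_singleton (p : List Char) (c : Char) (i : Nat) :
    pvCnt (p ++ [c]) i = pvCnt p i + (if c.toNat = 49 + i then 1 else 0) := by
  unfold pvCnt
  rw [List.countP_append]
  simp [List.countP_cons]

lemma pvSeen_append_digit (p : List Char) (c : Char) (h : 49 ≤ c.toNat ∧ c.toNat ≤ 56) :
    (pvSeen p).set (c.toNat - 49) ((pvSeen p).getD (c.toNat - 49) 0 + 1) = pvSeen (p ++ [c]) := by
  have hd8 : c.toNat - 49 < 8 := by omega
  rw [pvSeen_getD p hd8]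
  unfold pvSeen
  rw [pvSetMapRange]
  apply List.map_congr_left
  intro i hi
  have hi8 : i < 8 := List.mem_range.mp hi
  by_cases hit : i = c.toNat - 49
  · rw [if_pos hit, pvCnt_append_singleton, if_pos (by omega), hit]
    push_cast
    ring
  · rw [if_neg hit, pvCnt_append_singleton, if_neg (by omega), add_zero]

lemma pvSeen_append_nondigit (p : List Char) (c : Char)
    (h : ¬(49 ≤ c.toNat ∧ c.toNat ≤ 56)) : pvSeen (p ++ [c]) = pvSeen p := by
  unfold pvSeen
  apply List.map_congr_left
  intro i hi
  have hi8 : i < 8 := List.mem_range.mp hi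
  rw [pvCnt_append_singleton, if_neg (by omega), add_zero]

lemma pvGetD_append_mid (p q : List Char) (c : Char) :
    (p ++ (c :: q)).getD p.length ' ' = c := by
  rw [List.getD_eq_getElem?_getD, List.getElem?_append_right (le_refl p.length)]
  simp

lemma pvPass3 (base : List Int) :
    ∀ (r p : List Char) (out : List Int),
    (PySem.List.enumerate r (p.length : Int)).foldl (pvStepB base) (out, pvSeen p) =
      (out ++ (List.range r.length).map (fun k => pvBVal base (p ++ r) (p.length + k)),
       pvSeen (p ++ r)) := by
  intro r
  induction r with
  | nil => intro p out; simp [PySem.List.enumerate]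
  | cons c r' ih =>
    intro p out
    rw [PySem.List.enumerate_cons, List.foldl_cons]
    have hassoc : (p ++ [c]) ++ r' = p ++ (c :: r') := by simp
    have hlen1 : ((p.length : Int) + 1) = (((p ++ [c]).length : Nat) : Int) := by
      simp
    have hhead : (p ++ (c :: r')).getD p.length ' ' = c := pvGetD_append_mid p r' c
    have htake : (p ++ (c :: r')).take p.length = p := List.take_left
    have hmaps : ∀ g : Nat → Int,
        (List.range (r'.length + 1)).map g = g 0 :: (List.range r'.length).map (fun k => g (k + 1)) := by
      intro g
      rw [List.range_succ_eq_map, List.map_cons, List.map_map]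
      rfl
    by_cases hd : 49 ≤ c.toNat ∧ c.toNat ≤ 56
    · have hcond : ('1' ≤ c ∧ c ≤ '8') := ⟨(pvLe1 c).mpr hd.1, (pvLe8 c).mpr hd.2⟩
      have hstep : pvStepB base (out, pvSeen p) ((p.length : Int), c) =
          (out ++ [base.getD (c.toNat - 49) 0 + (pvSeen p).getD (c.toNat - 49) 0],
           (pvSeen p).set (c.toNat - 49) ((pvSeen p).getD (c.toNat - 49) 0 + 1)) := by
        unfold pvStepB
        rw [if_pos hcond]
      rw [hstep, pvSeen_append_digit p c hd, pvSeen_getD p (by omega), hlen1,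
        ih (p ++ [c]) (out ++ [base.getD (c.toNat - 49) 0 + (pvCnt p (c.toNat - 49) : Int)]),
        hassoc]
      simp only [Prod.mk.injEq]
      refine ⟨?_, by trivial⟩
      rw [List.length_cons, hmaps, List.append_assoc, List.singleton_append]
      congr 1
      congr 1
      · unfold pvBVal
        rw [add_zero, hhead, if_pos hd, htake]
        congr 1
        rw [← pvCnt_eq_count p c hd.1]
      · apply List.map_congr_left
        intro k _
        congr 1
        simp
        omega
    · have hcond : ¬('1' ≤ c ∧ c ≤ '8') := by
        intro hx
        exact hd ⟨(pvLe1 c).mp hx.1, (pvLe8 c).mp hx.2⟩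
      have hstep : pvStepB base (out, pvSeen p) ((p.length : Int), c) =
          (out ++ [(p.length : Int)], pvSeen p) := by
        unfold pvStepB
        rw [if_neg hcond]
      rw [hstep, show pvSeen p = pvSeen (p ++ [c]) from (pvSeen_append_nondigit p c hd).symm, hlen1,
        ih (p ++ [c]) (out ++ [(p.length : Int)]), hassoc]
      simp only [Prod.mk.injEq]
      refine ⟨?_, by trivial⟩
      rw [List.length_cons, hmaps, List.append_assoc, List.singleton_append]
      congr 1
      congr 1
      · unfold pvBVal
        rw [add_zero, hhead, if_neg hd]
      · apply List.map_congr_left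
        intro k _
        congr 1
        simp
        omega

lemma pvCounts_spec (f : List Int → Char → List Int)
    (hf : f = fun cnts c =>
      if '1' ≤ c ∧ c ≤ '8' then cnts.set (c.toNat - 49) (cnts.getD (c.toNat - 49) 0 + 1) else cnts) :
    ∀ (cs : List Char) (st : List Int), st.length = 8 →
      (cs.foldl f st).length = 8 ∧
      ∀ i < 8, (cs.foldl f st).getD i 0 = st.getD i 0 + (pvCnt cs i : Int) := by
  subst hf
  intro cs
  induction cs with
  | nil =>
    intro st hst
    refine ⟨hst, ?_⟩
    intro i _
    simp [pvCnt]
  | cons c cs ih =>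
    intro st hst
    simp only [List.foldl_cons]
    by_cases hd : ('1' ≤ c ∧ c ≤ '8')
    · rw [if_pos hd]
      have hd' : 49 ≤ c.toNat ∧ c.toNat ≤ 56 := ⟨(pvLe1 c).mp hd.1, (pvLe8 c).mp hd.2⟩
      have hlen : (st.set (c.toNat - 49) (st.getD (c.toNat - 49) 0 + 1)).length = 8 := by
        simp [hst]
      obtain ⟨h1, h2⟩ := ih _ hlen
      refine ⟨h1, ?_⟩
      intro i hi
      rw [h2 i hi]
      have hset : (st.set (c.toNat - 49) (st.getD (c.toNat - 49) 0 + 1)).getD i 0 =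
          st.getD i 0 + (if c.toNat = 49 + i then 1 else 0) := by
        by_cases hit : c.toNat - 49 = i
        · subst hit
          rw [List.getD_eq_getElem _ _ (by rw [List.length_set]; omega), List.getElem_set,
            if_pos rfl, if_pos (by omega)]
        · rw [List.getD_eq_getElem _ _ (by rw [List.length_set]; omega), List.getElem_set,
            if_neg hit, if_neg (by omega), add_zero]
          exact (List.getD_eq_getElem _ _ (by omega)).symm
      rw [hset]
      have hcc : pvCnt (c :: cs) i = (if c.toNat = 49 + i then 1 else 0) + pvCnt cs i := by
        unfold pvCnt
        rw [List.countP_cons]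
        simp only [beq_iff_eq]
        split_ifs <;> omega
      rw [hcc]
      push_cast
      split_ifs <;> ring
    · rw [if_neg hd]
      obtain ⟨h1, h2⟩ := ih st hst
      refine ⟨h1, ?_⟩
      intro i hi
      rw [h2 i hi]
      have hcc : pvCnt (c :: cs) i = pvCnt cs i := by
        unfold pvCnt
        rw [List.countP_cons]
        have : ¬ c.toNat = 49 + i := by
          intro hx
          exact hd ⟨(pvLe1 c).mpr (by omega), (pvLe8 c).mpr (by omega)⟩
        simp [this]
      rw [hcc]

lemma pvBVal_eq_stage (base : List Int) (cs : List Char)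
    (hbase : ∀ d < 8, base.getD d 0 = (pvLower cs d : Int)) (j : Nat) :
    pvBVal base cs j = pvStage cs 8 j := by
  unfold pvBVal pvStage
  by_cases hd : 49 ≤ (cs.getD j ' ').toNat ∧ (cs.getD j ' ').toNat ≤ 56
  · rw [if_pos hd, if_pos (by omega), hbase _ (by omega)]
  · rw [if_neg hd, if_neg (by omega)]

lemma pvB_eq (key : String) :
    keyword_num_assign_alt key = (List.range key.toList.length).map (pvStage key.toList 8) := by
  unfold keyword_num_assign_alt
  simp only []
  set K : List Int := key.toList.foldl
    (fun cnts c =>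
      if '1' ≤ c ∧ c ≤ '8' then cnts.set (c.toNat - 49) (cnts.getD (c.toNat - 49) 0 + 1) else cnts)
    (List.replicate 8 0) with hK
  set BS : List Int × Int := (PySem.List.pyRange 0 8 1).foldl
    (fun (st : List Int × Int) i => (PySem.List.pySetD st.1 i st.2, st.2 + PySem.List.pyGetD K i 0))
    (List.replicate 8 (0 : Int), (0 : Int)) with hBS
  have hcounts := (pvCounts_spec _ rfl key.toList (List.replicate 8 0) (by simp)).2
  rw [← hK] at hcounts
  have hq : ∀ j : Nat, j < 8 → PySem.List.pyGetD K ((j : Nat) : Int) 0 = (pvCnt key.toList j : Int) := by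
    intro j hj
    rw [PySem.List.pyGetD_of_nonneg K 0 (Int.natCast_nonneg j), Int.toNat_natCast,
      hcounts j hj, List.getD_eq_getElem _ _ (show j < (List.replicate 8 (0 : Int)).length by simpa using hj)]
    rw [List.getElem_replicate, zero_add]
  have hB8 : BS.1 =
      [0,
       0 + PySem.List.pyGetD K ((0 : Nat) : Int) 0,
       0 + PySem.List.pyGetD K ((0 : Nat) : Int) 0 + PySem.List.pyGetD K ((1 : Nat) : Int) 0,
       0 + PySem.List.pyGetD K ((0 : Nat) : Int) 0 + PySem.List.pyGetD K ((1 : Nat) : Int) 0 +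
         PySem.List.pyGetD K ((2 : Nat) : Int) 0,
       0 + PySem.List.pyGetD K ((0 : Nat) : Int) 0 + PySem.List.pyGetD K ((1 : Nat) : Int) 0 +
         PySem.List.pyGetD K ((2 : Nat) : Int) 0 + PySem.List.pyGetD K ((3 : Nat) : Int) 0,
       0 + PySem.List.pyGetD K ((0 : Nat) : Int) 0 + PySem.List.pyGetD K ((1 : Nat) : Int) 0 +
         PySem.List.pyGetD K ((2 : Nat) : Int) 0 + PySem.List.pyGetD K ((3 : Nat) : Int) 0 +
         PySem.List.pyGetD K ((4 : Nat) : Int) 0,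
       0 + PySem.List.pyGetD K ((0 : Nat) : Int) 0 + PySem.List.pyGetD K ((1 : Nat) : Int) 0 +
         PySem.List.pyGetD K ((2 : Nat) : Int) 0 + PySem.List.pyGetD K ((3 : Nat) : Int) 0 +
         PySem.List.pyGetD K ((4 : Nat) : Int) 0 + PySem.List.pyGetD K ((5 : Nat) : Int) 0,
       0 + PySem.List.pyGetD K ((0 : Nat) : Int) 0 + PySem.List.pyGetD K ((1 : Nat) : Int) 0 +
         PySem.List.pyGetD K ((2 : Nat) : Int) 0 + PySem.List.pyGetD K ((3 : Nat) : Int) 0 +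
         PySem.List.pyGetD K ((4 : Nat) : Int) 0 + PySem.List.pyGetD K ((5 : Nat) : Int) 0 +
         PySem.List.pyGetD K ((6 : Nat) : Int) 0] := by
    rw [hBS, show PySem.List.pyRange 0 8 1 = [0, 1, 2, 3, 4, 5, 6, 7] from by decide]
    simp only [List.foldl_cons, List.foldl_nil]
    rfl
  have hLsucc : ∀ m : Nat, pvLower key.toList (m + 1) = pvLower key.toList m + pvCnt key.toList m := by
    intro m
    unfold pvLower
    rw [List.range_succ, List.map_append, List.sum_append]
    simp
  have hq0 := hq 0 (by norm_num)
  have hq1 := hq 1 (by norm_num)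
  have hq2 := hq 2 (by norm_num)
  have hq3 := hq 3 (by norm_num)
  have hq4 := hq 4 (by norm_num)
  have hq5 := hq 5 (by norm_num)
  have hq6 := hq 6 (by norm_num)
  simp only [Nat.cast_zero, Nat.cast_one, Nat.cast_ofNat] at hq0 hq1 hq2 hq3 hq4 hq5 hq6
  have hbase : ∀ d, d < 8 → BS.1.getD d 0 = (pvLower key.toList d : Int) := by
    intro d hd
    rw [hB8]
    interval_cases d <;>
      simp only [List.getD] <;>
      norm_num [hq0, hq1, hq2, hq3, hq4, hq5, hq6, pvLower, List.range_succ, List.map_append,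
        List.sum_append, List.sum_cons, List.sum_nil, List.map_cons, List.map_nil] <;>
      ring
  have h3 := pvPass3 BS.1 key.toList [] []
  simp only [List.length_nil, Nat.cast_zero, List.nil_append, zero_add] at h3
  have hseen : pvSeen ([] : List Char) = List.replicate 8 (0 : Int) := rfl
  rw [hseen] at h3
  show (List.foldl (pvStepB BS.1) ([], List.replicate 8 0) (PySem.List.enumerate key.toList)).1
    = List.map (pvStage key.toList 8) (List.range key.toList.length)
  rw [h3]
  apply List.map_congr_left
  intro k _
  exact pvBVal_eq_stage BS.1 key.toList hbase k

-- ===== VERDICT (by name: the statement is the Claim_ definition above) =====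
theorem keyword_num_assign_spec : Claim_equal_keyword_num_assign := by
  intro key _
  show keyword_num_assign key = keyword_num_assign_alt key
  rw [pvA_eq, pvB_eq]
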